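-- pv_equiv track=rewrite | github.com/arathisreedhu/uipath | password_analyzer-main/password_analyzer/pattern_detector.py | _find_sequential
-- ===== SOURCE A (Python) =====
-- from typing import Dict, List
--
-- def _find_sequential(password: str) -> List[str]:
--     """Find sequential patterns (e.g., '123', 'abc')."""
--     sequences = []
--
--     # Check for numeric sequences
--     for i in range(len(password) - 2):
--         substr = password[i:i+3]
--         if substr.isdigit():
--             a, b, c = int(substr[0]), int(substr[1]), int(substr[2])
--             if b == a + 1 and c == b + 1:
--                 sequences.append(substr)
--             elif b == a - 1 and c == b - 1:
--                 sequences.append(substr)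
--
--     # Check for alphabetic sequences
--     for i in range(len(password) - 2):
--         substr = password[i:i+3].lower()
--         if substr.isalpha():
--             a, b, c = ord(substr[0]), ord(substr[1]), ord(substr[2])
--             if b == a + 1 and c == b + 1:
--                 sequences.append(substr)
--             elif b == a - 1 and c == b - 1:
--                 sequences.append(substr)
--
--     return sequences
-- ===== SOURCE B (Python) =====
-- from typing import List
--
-- def _find_sequential(password: str) -> List[str]:
--     """Find sequential patterns (e.g., '123', 'abc')."""
--     nums: List[str] = []
--     alphas: List[str] = []
--     for a, b, c in zip(password, password[1:], password[2:]):
--         if a.isdigit() and b.isdigit() and c.isdigit():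
--             x, y, z = int(a), int(b), int(c)
--             if y - x == z - y and abs(y - x) == 1:
--                 nums.append(a + b + c)
--         else:
--             la, lb, lc = a.lower(), b.lower(), c.lower()
--             if la.isalpha() and lb.isalpha() and lc.isalpha():
--                 x, y, z = ord(la), ord(lb), ord(lc)
--                 if y - x == z - y and abs(y - x) == 1:
--                     alphas.append(la + lb + lc)
--     return nums + alphas
-- ===== Notes on version B (the rewrite author's own statement) =====
-- stated objective: alternative
-- what changed: A's two separate index loops over the string (one for numeric, one for alphabetic windows) are fused into a single pass over the 3-char windows (zip of the string with its two shifts) keeping a (numeric, alphabetic) pair of accumulators that is concatenated at the end; the sequence test is a single difference/abs check instead of an ascending/descending if-elif chain.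
import Mathlib
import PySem

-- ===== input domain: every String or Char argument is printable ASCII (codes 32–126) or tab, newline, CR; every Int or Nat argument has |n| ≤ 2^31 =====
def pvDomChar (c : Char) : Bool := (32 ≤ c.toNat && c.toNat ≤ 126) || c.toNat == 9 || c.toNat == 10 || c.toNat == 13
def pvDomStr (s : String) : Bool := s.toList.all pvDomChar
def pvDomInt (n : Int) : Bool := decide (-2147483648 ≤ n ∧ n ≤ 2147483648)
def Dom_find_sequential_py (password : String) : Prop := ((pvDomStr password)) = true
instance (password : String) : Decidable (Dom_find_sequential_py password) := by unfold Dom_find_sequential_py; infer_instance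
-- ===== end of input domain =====

-- B fuses A's two index passes into one pass over the 3-char windows (zip of the string with its two shifts),
-- keeping a (numeric, alphabetic) pair of accumulators and concatenating at the end: same return value, one traversal (objective: alternative).

-- ===== PORT A =====
def find_sequential_py (password : String) : List String :=
  let cs := password.toList
  -- first loop: numeric sequences
  let seqs := (PySem.List.pyRange 0 ((cs.length : Int) - 2) 1).foldl (fun seqs i =>
    let substr := PySem.List.slice cs (some i) (some (i + 3))
    if PySem.Chars.strIsdigit substr then
      -- int(substr[k]): the isdigit guard means ofChars? is some here, so getD 0 is exact
      let a := (PySem.Int.ofChars? [PySem.List.pyGetD substr 0 ' ']).getD 0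
      let b := (PySem.Int.ofChars? [PySem.List.pyGetD substr 1 ' ']).getD 0
      let c := (PySem.Int.ofChars? [PySem.List.pyGetD substr 2 ' ']).getD 0
      if b = a + 1 ∧ c = b + 1 then seqs ++ [String.mk substr]
      else if b = a - 1 ∧ c = b - 1 then seqs ++ [String.mk substr]
      else seqs
    else seqs) ([] : List String)
  -- second loop: alphabetic sequences
  (PySem.List.pyRange 0 ((cs.length : Int) - 2) 1).foldl (fun seqs i =>
    let substr := PySem.Chars.lower (PySem.List.slice cs (some i) (some (i + 3)))
    if PySem.Chars.strIsalpha substr then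
      let a : Int := (PySem.List.pyGetD substr 0 ' ').toNat  -- ord
      let b : Int := (PySem.List.pyGetD substr 1 ' ').toNat
      let c : Int := (PySem.List.pyGetD substr 2 ' ').toNat
      if b = a + 1 ∧ c = b + 1 then seqs ++ [String.mk substr]
      else if b = a - 1 ∧ c = b - 1 then seqs ++ [String.mk substr]
      else seqs
    else seqs) seqs

-- ===== PORT B =====
def find_sequential_py_alt (password : String) : List String :=
  let cs := password.toList
  -- for a, b, c in zip(password, password[1:], password[2:])
  let res := (cs.zip ((cs.drop 1).zip (cs.drop 2))).foldl
    (fun (p : List String × List String) w =>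
      let a := w.1; let b := w.2.1; let c := w.2.2
      if PySem.Chars.isdigit a && PySem.Chars.isdigit b && PySem.Chars.isdigit c then
        -- int(a) etc.: guarded by isdigit, so ofChars? is some and getD 0 is exact
        let x := (PySem.Int.ofChars? [a]).getD 0
        let y := (PySem.Int.ofChars? [b]).getD 0
        let z := (PySem.Int.ofChars? [c]).getD 0
        if y - x = z - y ∧ |y - x| = 1 then (p.1 ++ [String.mk [a, b, c]], p.2) else p
      else
        let la := PySem.Chars.lowerChar a
        let lb := PySem.Chars.lowerChar b
        let lc := PySem.Chars.lowerChar c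
        if PySem.Chars.isalpha la && PySem.Chars.isalpha lb && PySem.Chars.isalpha lc then
          let x : Int := la.toNat; let y : Int := lb.toNat; let z : Int := lc.toNat  -- ord
          if y - x = z - y ∧ |y - x| = 1 then (p.1, p.2 ++ [String.mk [la, lb, lc]]) else p
        else p)
    (([], []) : List String × List String)
  res.1 ++ res.2

-- ===== PRECONDITION & SPEC =====
def Spec_find_sequential_py (password : String) (out : List String) : Prop := out = find_sequential_py_alt password
instance (password : String) (out : List String) : Decidable (Spec_find_sequential_py password out) := by unfold Spec_find_sequential_py; infer_instance

-- ===== CLAIM (what is proved, stated in full; the proofs are below) =====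
def Claim_equal_find_sequential_py : Prop := ∀ (password : String), Dom_find_sequential_py password → Spec_find_sequential_py password (find_sequential_py password)

-- ===== LEMMAS AND PROOFS =====

-- the list of 3-char windows of cs
def pvTriples : List Char → List (Char × Char × Char)
  | a :: b :: c :: r => (a, b, c) :: pvTriples (b :: c :: r)
  | _ => []

-- what A's numeric loop contributes at one window (as a function of the window's char list)
def pvGNum (substr : List Char) : List String :=
  if PySem.Chars.strIsdigit substr then
    let a := (PySem.Int.ofChars? [PySem.List.pyGetD substr 0 ' ']).getD 0
    let b := (PySem.Int.ofChars? [PySem.List.pyGetD substr 1 ' ']).getD 0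
    let c := (PySem.Int.ofChars? [PySem.List.pyGetD substr 2 ' ']).getD 0
    if b = a + 1 ∧ c = b + 1 then [String.mk substr]
    else if b = a - 1 ∧ c = b - 1 then [String.mk substr]
    else []
  else []

-- what A's alphabetic loop contributes at one window
def pvGAlpha (s : List Char) : List String :=
  let substr := PySem.Chars.lower s
  if PySem.Chars.strIsalpha substr then
    let a : Int := (PySem.List.pyGetD substr 0 ' ').toNat
    let b : Int := (PySem.List.pyGetD substr 1 ' ').toNat
    let c : Int := (PySem.List.pyGetD substr 2 ' ').toNat
    if b = a + 1 ∧ c = b + 1 then [String.mk substr]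
    else if b = a - 1 ∧ c = b - 1 then [String.mk substr]
    else []
  else []

-- what B contributes to the numeric accumulator at one window
def pvG1 (w : Char × Char × Char) : List String :=
  if PySem.Chars.isdigit w.1 && PySem.Chars.isdigit w.2.1 && PySem.Chars.isdigit w.2.2 then
    let x := (PySem.Int.ofChars? [w.1]).getD 0
    let y := (PySem.Int.ofChars? [w.2.1]).getD 0
    let z := (PySem.Int.ofChars? [w.2.2]).getD 0
    if y - x = z - y ∧ |y - x| = 1 then [String.mk [w.1, w.2.1, w.2.2]] else []
  else []

-- what B contributes to the alphabetic accumulator at one window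
def pvG2 (w : Char × Char × Char) : List String :=
  if PySem.Chars.isdigit w.1 && PySem.Chars.isdigit w.2.1 && PySem.Chars.isdigit w.2.2 then []
  else
    let la := PySem.Chars.lowerChar w.1
    let lb := PySem.Chars.lowerChar w.2.1
    let lc := PySem.Chars.lowerChar w.2.2
    if PySem.Chars.isalpha la && PySem.Chars.isalpha lb && PySem.Chars.isalpha lc then
      if (lb.toNat : Int) - la.toNat = (lc.toNat : Int) - lb.toNat ∧ |(lb.toNat : Int) - la.toNat| = 1 then
        [String.mk [la, lb, lc]]
      else []
    else []

theorem pv_zip_eq_triples : ∀ cs : List Char,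
    cs.zip ((cs.drop 1).zip (cs.drop 2)) = pvTriples cs := by
  intro cs
  induction cs with
  | nil => rfl
  | cons a t ih =>
    cases t with
    | nil => rfl
    | cons b u =>
      cases u with
      | nil => rfl
      | cons c r => simpa [pvTriples] using ih

theorem pv_windows_eq_triples : ∀ cs : List Char,
    (List.range (cs.length - 2)).map (fun i => (cs.drop i).take 3)
      = (pvTriples cs).map (fun w => [w.1, w.2.1, w.2.2]) := by
  intro cs
  induction cs with
  | nil => rfl
  | cons a t ih =>
    cases t with
    | nil => rfl
    | cons b u =>
      cases u with
      | nil => rfl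
      | cons c r =>
        have hlen : (a :: b :: c :: r).length - 2 = (r.length) + 1 := by simp
        have hlen' : (b :: c :: r).length - 2 = r.length := by simp
        rw [hlen, List.range_succ_eq_map]
        simp only [List.map_cons, List.map_map, pvTriples, List.map]
        refine congrArg₂ List.cons rfl ?_
        rw [hlen'] at ih
        simpa [Function.comp, List.drop_succ_cons] using ih

theorem pv_pairfold {α : Type} (g1 g2 : α → List String) :
    ∀ (l : List α) (p : List String × List String),
      l.foldl (fun p w => (p.1 ++ g1 w, p.2 ++ g2 w)) p
        = (p.1 ++ l.flatMap g1, p.2 ++ l.flatMap g2) := by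
  intro l
  induction l with
  | nil => intro p; simp
  | cons x xs ih => intro p; simp [ih]

theorem pv_digit_not_alpha (c : Char) (h : PySem.Chars.isdigit c = true) :
    PySem.Chars.isalpha (PySem.Chars.lowerChar c) = false := by
  simp only [PySem.Chars.isdigit, PySem.Chars.isalpha, PySem.Chars.lowerChar, PySem.Chars.isupper,
    PySem.Chars.islower, Char.le_def, Bool.and_eq_true, decide_eq_true_eq,
    UInt32.le_iff_toNat_le, show ('0':Char).val.toNat = 48 from rfl,
    show ('9':Char).val.toNat = 57 from rfl, show ('A':Char).val.toNat = 65 from rfl,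
    show ('Z':Char).val.toNat = 90 from rfl, show ('a':Char).val.toNat = 97 from rfl,
    show ('z':Char).val.toNat = 122 from rfl] at *
  rw [if_neg (by omega)]
  simp only [Bool.or_eq_false_iff, Bool.and_eq_false_iff, decide_eq_false_iff_not]
  omega

-- one pass of A, generically over the per-window contribution G
theorem pv_pass (cs : List Char) (G : List Char → List String) (init : List String) :
    (PySem.List.pyRange 0 ((cs.length : Int) - 2) 1).foldl
        (fun acc i => acc ++ G (PySem.List.slice cs (some i) (some (i + 3)))) init
      = init ++ (pvTriples cs).flatMap (fun w => G [w.1, w.2.1, w.2.2]) := by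
  rw [PySem.List.pyRange_one]
  have ht : (((cs.length : Int) - 2) - 0).toNat = cs.length - 2 := by omega
  rw [ht, List.foldl_map]
  have hbody : ∀ (acc : List String) (k : Nat), k ∈ List.range (cs.length - 2) →
      acc ++ G (PySem.List.slice cs (some ((0 : Int) + k)) (some ((0 : Int) + k + 3)))
        = acc ++ G ((cs.drop k).take 3) := by
    intro acc k _
    rw [zero_add]
    have h3 : ((k : Int) + 3) = ((k + 3 : Nat) : Int) := by push_cast; ring
    rw [h3, PySem.List.slice_natCast]
    simp
  rw [PySem.List.foldl_congr_mem _ _ _ _ hbody]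
  rw [← List.foldl_map (f := fun k => (cs.drop k).take 3) (g := fun acc w => acc ++ G w)]
  rw [pv_windows_eq_triples, List.foldl_map]
  exact PySem.List.foldl_append_eq_flatMap _ _ _

theorem pv_gnum_eq (a b c : Char) : pvGNum [a, b, c] = pvG1 (a, b, c) := by
  simp only [pvGNum, pvG1, PySem.Chars.strIsdigit, List.isEmpty_cons, Bool.not_false,
    Bool.true_and, List.all_cons, List.all_nil, Bool.and_true,
    PySem.List.pyGetD_ofNat', List.getD_cons_zero, List.getD_cons_succ,
    Bool.and_eq_true, abs_eq (by norm_num : (0 : Int) ≤ 1)]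
  split_ifs <;> first | rfl | omega | tauto

theorem pv_galpha_eq (a b c : Char) : pvGAlpha [a, b, c] = pvG2 (a, b, c) := by
  by_cases hd : (PySem.Chars.isdigit a && PySem.Chars.isdigit b && PySem.Chars.isdigit c) = true
  · have hda := hd; simp only [Bool.and_eq_true] at hda
    obtain ⟨⟨ha, _⟩, _⟩ := hda
    simp [pvGAlpha, pvG2, PySem.Chars.lower, PySem.Chars.strIsalpha, hd,
      pv_digit_not_alpha _ ha]
  · simp only [pvGAlpha, pvG2, PySem.Chars.lower, List.map_cons, List.map_nil,
      PySem.Chars.strIsalpha, List.isEmpty_cons, Bool.not_false, Bool.true_and,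
      List.all_cons, List.all_nil, Bool.and_true, hd,
      PySem.List.pyGetD_ofNat', List.getD_cons_zero, List.getD_cons_succ,
      Bool.and_eq_true, abs_eq (by norm_num : (0 : Int) ≤ 1)]
    split_ifs <;> first | rfl | omega | tauto

theorem pv_fun_gnum : (fun w : Char × Char × Char => pvGNum [w.1, w.2.1, w.2.2]) = pvG1 :=
  funext fun w => by rcases w with ⟨a, b, c⟩; exact pv_gnum_eq a b c

theorem pv_fun_galpha : (fun w : Char × Char × Char => pvGAlpha [w.1, w.2.1, w.2.2]) = pvG2 :=
  funext fun w => by rcases w with ⟨a, b, c⟩; exact pv_galpha_eq a b c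

-- A's numeric loop, exactly as ported, equals the flatMap of pvG1 over the windows
theorem pv_passA_num (cs : List Char) (init : List String) :
    (PySem.List.pyRange 0 ((cs.length : Int) - 2) 1).foldl (fun seqs i =>
        let substr := PySem.List.slice cs (some i) (some (i + 3))
        if PySem.Chars.strIsdigit substr then
          let a := (PySem.Int.ofChars? [PySem.List.pyGetD substr 0 ' ']).getD 0
          let b := (PySem.Int.ofChars? [PySem.List.pyGetD substr 1 ' ']).getD 0
          let c := (PySem.Int.ofChars? [PySem.List.pyGetD substr 2 ' ']).getD 0
          if b = a + 1 ∧ c = b + 1 then seqs ++ [String.mk substr]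
          else if b = a - 1 ∧ c = b - 1 then seqs ++ [String.mk substr]
          else seqs
        else seqs) init
      = init ++ (pvTriples cs).flatMap pvG1 := by
  rw [PySem.List.foldl_congr_mem _ _
    (fun (acc : List String) (i : Int) =>
      acc ++ pvGNum (PySem.List.slice cs (some i) (some (i + 3)))) init ?h]
  case h =>
    intro acc i _
    simp only [pvGNum]
    split_ifs <;> simp
  rw [pv_pass cs pvGNum init, pv_fun_gnum]

-- A's alphabetic loop, exactly as ported, equals the flatMap of pvG2 over the windows
theorem pv_passA_alpha (cs : List Char) (init : List String) :
    (PySem.List.pyRange 0 ((cs.length : Int) - 2) 1).foldl (fun seqs i =>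
        let substr := PySem.Chars.lower (PySem.List.slice cs (some i) (some (i + 3)))
        if PySem.Chars.strIsalpha substr then
          let a : Int := (PySem.List.pyGetD substr 0 ' ').toNat
          let b : Int := (PySem.List.pyGetD substr 1 ' ').toNat
          let c : Int := (PySem.List.pyGetD substr 2 ' ').toNat
          if b = a + 1 ∧ c = b + 1 then seqs ++ [String.mk substr]
          else if b = a - 1 ∧ c = b - 1 then seqs ++ [String.mk substr]
          else seqs
        else seqs) init
      = init ++ (pvTriples cs).flatMap pvG2 := by
  rw [PySem.List.foldl_congr_mem _ _
    (fun (acc : List String) (i : Int) =>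
      acc ++ pvGAlpha (PySem.List.slice cs (some i) (some (i + 3)))) init ?h]
  case h =>
    intro acc i _
    simp only [pvGAlpha]
    split_ifs <;> simp
  rw [pv_pass cs pvGAlpha init, pv_fun_galpha]

-- B's single loop, exactly as ported, equals the pair of flatMaps
theorem pv_passB (l : List (Char × Char × Char)) (p : List String × List String) :
    l.foldl (fun (p : List String × List String) w =>
        let a := w.1; let b := w.2.1; let c := w.2.2
        if PySem.Chars.isdigit a && PySem.Chars.isdigit b && PySem.Chars.isdigit c then
          let x := (PySem.Int.ofChars? [a]).getD 0
          let y := (PySem.Int.ofChars? [b]).getD 0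
          let z := (PySem.Int.ofChars? [c]).getD 0
          if y - x = z - y ∧ |y - x| = 1 then (p.1 ++ [String.mk [a, b, c]], p.2) else p
        else
          let la := PySem.Chars.lowerChar a
          let lb := PySem.Chars.lowerChar b
          let lc := PySem.Chars.lowerChar c
          if PySem.Chars.isalpha la && PySem.Chars.isalpha lb && PySem.Chars.isalpha lc then
            let x : Int := la.toNat; let y : Int := lb.toNat; let z : Int := lc.toNat
            if y - x = z - y ∧ |y - x| = 1 then (p.1, p.2 ++ [String.mk [la, lb, lc]]) else p
          else p) p
      = (p.1 ++ l.flatMap pvG1, p.2 ++ l.flatMap pvG2) := by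
  rw [PySem.List.foldl_congr_mem _ _
    (fun (p : List String × List String) (w : Char × Char × Char) =>
      (p.1 ++ pvG1 w, p.2 ++ pvG2 w)) p ?h]
  case h =>
    intro p w _
    simp only [pvG1, pvG2]
    split_ifs <;> simp
  exact pv_pairfold pvG1 pvG2 l p

theorem pv_main (password : String) :
    find_sequential_py password = find_sequential_py_alt password := by
  unfold find_sequential_py find_sequential_py_alt
  dsimp only
  rw [pv_zip_eq_triples, pv_passA_num password.toList [], pv_passA_alpha password.toList,
    pv_passB (pvTriples password.toList) ([], [])]
  simp

-- ===== VERDICT (by name: the statement is the Claim_ definition above) =====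
theorem find_sequential_py_spec : Claim_equal_find_sequential_py := by
  intro password _
  unfold Spec_find_sequential_py
  exact pv_main password
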